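-- pv_equiv track=rewrite | github.com/YuChengHsieh/LeetCode | Problem_List/02306.py | distinctNames
-- ===== SOURCE A (Python) =====
-- def distinctNames(ideas: list[str]) -> int:
--     hash_map = {}
--     for idea in ideas:
--         if hash_map.get(idea[1:]) is None:
--             hash_map[idea[1:]] = set()
--         hash_map[idea[1:]].add(idea[0])
--
--     value = list(hash_map.values())
--     value_len = len(value)
--     cnt = 0
--     for i in range(value_len):
--         for j in range(i,value_len):
--             intersection = value[i]&value[j]
--             cnt += len(value[i]-intersection)*len(value[j]-intersection)*2
--     return cnt
-- ===== SOURCE B (Python) =====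
-- def distinctNames(ideas: list[str]) -> int:
--     groups = {}
--     for idea in ideas:
--         groups.setdefault(idea[1:], set()).add(idea[0])
--     letters = set()
--     for s in groups.values():
--         letters |= s
--     total = 0
--     for a in letters:
--         for b in letters:
--             ca = sum(1 for s in groups.values() if a in s and b not in s)
--             cb = sum(1 for s in groups.values() if b in s and a not in s)
--             total += ca * cb
--     return total
-- ===== Notes on version B (the rewrite author's own statement) =====
-- stated objective: faster
-- what changed: Instead of comparing every pair of suffix groups with set operations (O(G^2)), B counts, for each ordered pair of first letters (a,b), the number of groups containing a but not b, and sums c(a,b)*c(b,a) over letter pairs (O(n + L^2*G), L = alphabet size).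
import Mathlib
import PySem

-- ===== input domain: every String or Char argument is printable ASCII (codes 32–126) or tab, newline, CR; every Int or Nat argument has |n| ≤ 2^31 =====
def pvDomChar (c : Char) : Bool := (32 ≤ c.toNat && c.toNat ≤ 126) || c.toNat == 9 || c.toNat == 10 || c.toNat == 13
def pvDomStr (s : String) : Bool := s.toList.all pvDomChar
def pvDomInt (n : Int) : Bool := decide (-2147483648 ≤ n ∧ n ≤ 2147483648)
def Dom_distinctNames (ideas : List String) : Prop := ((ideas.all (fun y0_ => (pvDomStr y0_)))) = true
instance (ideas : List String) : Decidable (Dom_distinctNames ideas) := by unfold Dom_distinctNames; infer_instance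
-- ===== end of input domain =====

-- B replaces A's O(G^2) pairwise comparison of suffix groups by per-first-letter-pair counts
-- c(a,b) = #groups containing a but not b, summing c(a,b)*c(b,a) over letter pairs (objective: faster).

-- ===== PORT A =====
-- one step of A's dict-building loop: ensure the suffix key exists, then add the first letter
def pvStepA (d : PySem.Dict String (PySem.Set Char)) (idea : String) :
    PySem.Dict String (PySem.Set Char) :=
  let key := PySem.Str.slice idea (some 1) none
  let d' := if d.get? key = none then d.insert key PySem.Set.empty else d
  match PySem.Str.pyGet? idea 0 with   -- none = IndexError on idea = "" (excluded by Pre_)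
  | some c => d'.modify key PySem.Set.empty (fun s => s.add c)
  | none => d'

def distinctNames (ideas : List String) : Int :=
  let hm := ideas.foldl pvStepA PySem.Dict.empty
  let value := hm.values
  let value_len : Int := (value.length : Int)
  (PySem.List.pyRange 0 value_len).foldl (fun cnt i =>
    (PySem.List.pyRange i value_len).foldl (fun cnt j =>
      let vi := PySem.List.pyGetD value i PySem.Set.empty
      let vj := PySem.List.pyGetD value j PySem.Set.empty
      let inter := vi.inter vj
      cnt + PySem.Set.len (vi.diff inter) * PySem.Set.len (vj.diff inter) * 2) cnt) 0

-- ===== PORT B =====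
-- one step of B's dict-building loop (setdefault, then add the first letter)
def pvStepB (d : PySem.Dict String (PySem.Set Char)) (idea : String) :
    PySem.Dict String (PySem.Set Char) :=
  let key := PySem.Str.slice idea (some 1) none
  let d' := d.setdefault key PySem.Set.empty
  match PySem.Str.pyGet? idea 0 with   -- none = IndexError on idea = "" (excluded by Pre_)
  | some c => d'.modify key PySem.Set.empty (fun s => s.add c)
  | none => d'

def distinctNames_alt (ideas : List String) : Int :=
  let groups := ideas.foldl pvStepB PySem.Dict.empty
  let letters := groups.values.foldl (fun acc s => acc.union s) PySem.Set.empty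
  letters.foldl (fun tot a =>
    letters.foldl (fun tot b =>
      tot + ((groups.values.filter (fun s => s.contains a && !(s.contains b))).length : Int)
          * ((groups.values.filter (fun s => s.contains b && !(s.contains a))).length : Int)) tot) 0

-- ===== PRECONDITION & SPEC =====
-- Pre_ excludes lists containing the empty string: there both A and B raise IndexError on idea[0].
def Pre_distinctNames (ideas : List String) : Prop := ∀ s ∈ ideas, s ≠ ""
instance (ideas : List String) : Decidable (Pre_distinctNames ideas) := by
  unfold Pre_distinctNames; infer_instance
def pvWitness_distinctNames : List String := ["ab", "bb", "ca"]

def Spec_distinctNames (ideas : List String) (out : Int) : Prop := out = distinctNames_alt ideas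
instance (ideas : List String) (out : Int) : Decidable (Spec_distinctNames ideas out) := by
  unfold Spec_distinctNames; infer_instance

-- ===== CLAIM (what is proved, stated in full; the proofs are below) =====
def Claim_equal_distinctNames : Prop := ∀ (ideas : List String), Dom_distinctNames ideas →
  Pre_distinctNames ideas → Spec_distinctNames ideas (distinctNames ideas)

-- ===== LEMMAS AND PROOFS =====

theorem pvStepA_eq_stepB : pvStepA = pvStepB := by
  funext d idea
  unfold pvStepA pvStepB
  by_cases hc : d.contains (PySem.Str.slice idea (some 1) none) = true <;>
    simp [PySem.Dict.setdefault, PySem.Dict.insert, PySem.Dict.get?_eq_none_iff_contains, hc]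

theorem pv_mem_values_insert {κ ν : Type} [BEq κ] (d : PySem.Dict κ ν) (k : κ) (v w : ν)
    (h : w ∈ (d.insert k v).values) : w ∈ d.values ∨ w = v := by
  unfold PySem.Dict.insert at h
  by_cases hc : d.contains k = true
  · simp only [hc, if_true, PySem.Dict.values, List.map_map, List.mem_map] at h
    rcases h with ⟨p, hp, hw⟩
    simp only [Function.comp] at hw
    split_ifs at hw
    · right; exact hw.symm
    · left; exact List.mem_map.mpr ⟨p, hp, hw⟩
  · rw [if_neg hc] at h
    simp only [PySem.Dict.values, List.map_append, List.mem_append] at h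
    rcases h with h | h
    · left; exact h
    · right; simpa using h
theorem pv_getD_mem_values {κ ν : Type} [BEq κ] (d : PySem.Dict κ ν) (k : κ) (dflt : ν) :
    d.getD k dflt = dflt ∨ d.getD k dflt ∈ d.values := by
  unfold PySem.Dict.getD PySem.Dict.get?
  cases hf : List.find? (fun p => p.1 == k) d.items with
  | none => left; rfl
  | some p => right; exact List.mem_map.mpr ⟨p, List.mem_of_find?_eq_some hf, rfl⟩
theorem pv_step_values_nodup (d : PySem.Dict String (PySem.Set Char)) (idea : String)
    (hd : ∀ v ∈ d.values, v.Nodup) : ∀ v ∈ (pvStepB d idea).values, v.Nodup := by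
  unfold pvStepB
  set key := PySem.Str.slice idea (some 1) none with hk
  have hd' : ∀ v ∈ (d.setdefault key PySem.Set.empty).values, v.Nodup := by
    unfold PySem.Dict.setdefault
    split_ifs with hc
    · exact hd
    · intro v hv
      simp only [PySem.Dict.values, List.map_append, List.mem_append] at hv
      rcases hv with hv | hv
      · exact hd v hv
      · simp at hv; subst hv; exact List.nodup_nil
  cases hg : PySem.Str.pyGet? idea 0 with
  | none => simpa using hd'
  | some c =>
    simp only
    intro v hv
    unfold PySem.Dict.modify at hv
    rcases pv_mem_values_insert _ _ _ _ hv with h | h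
    · exact hd' v h
    · subst h
      apply PySem.Set.nodup_add
      rcases pv_getD_mem_values (d.setdefault key PySem.Set.empty) key PySem.Set.empty with h | h
      · rw [h]; exact List.nodup_nil
      · exact hd' _ h
theorem pv_build_values_nodup (ideas : List String) (d : PySem.Dict String (PySem.Set Char))
    (hd : ∀ v ∈ d.values, v.Nodup) :
    ∀ v ∈ (ideas.foldl pvStepB d).values, v.Nodup := by
  induction ideas generalizing d with
  | nil => exact hd
  | cons idea ideas ih => exact ih _ (pv_step_values_nodup d idea hd)

theorem pv_mem_foldl_union (V : List (PySem.Set Char)) (acc : PySem.Set Char) (a : Char) :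
    a ∈ V.foldl (fun acc s => acc.union s) acc ↔ a ∈ acc ∨ ∃ s ∈ V, a ∈ s := by
  induction V generalizing acc with
  | nil => simp
  | cons s V ih =>
    simp only [List.foldl_cons, ih, PySem.Set.mem_union, List.mem_cons]
    constructor
    · rintro (⟨h | h⟩ | ⟨t, ht, h⟩)
      · exact Or.inl h
      · exact Or.inr ⟨s, Or.inl rfl, h⟩
      · exact Or.inr ⟨t, Or.inr ht, h⟩
    · rintro (h | ⟨t, (rfl | ht), h⟩)
      · exact Or.inl (Or.inl h)
      · exact Or.inl (Or.inr h)
      · exact Or.inr ⟨t, ht, h⟩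
theorem pv_nodup_foldl_union (V : List (PySem.Set Char)) (acc : PySem.Set Char)
    (hacc : acc.Nodup) : (V.foldl (fun acc s => acc.union s) acc).Nodup := by
  induction V generalizing acc with
  | nil => exact hacc
  | cons s V ih => exact ih _ (PySem.Set.nodup_union _ _ hacc)

theorem pv_map_getD_range {α : Type} (l : List α) (d : α) :
    (List.range l.length).map (fun i => l.getD i d) = l := by
  apply List.ext_getElem (by simp)
  intro i h1 h2
  simp [List.getD_eq_getElem?_getD, List.getElem?_eq_getElem h2]
theorem pv_countP_eq_sum (V : List (PySem.Set Char)) (p : PySem.Set Char → Bool) :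
    ((V.countP p : Int)) =
      ∑ i ∈ Finset.range V.length, (if p (V.getD i PySem.Set.empty) = true then (1 : Int) else 0) := by
  rw [← PySem.List.sum_map_ite_one_zero p V]
  show _ = ((List.range V.length).map fun i => if p (V.getD i PySem.Set.empty) = true then (1:ℤ) else 0).sum
  conv_lhs => rw [← pv_map_getD_range V PySem.Set.empty]
  rw [List.map_map]
  rfl
theorem pv_len_diff_eq_sum (L : PySem.Set Char) (s t : PySem.Set Char)
    (hs : s.Nodup) (hsub : ∀ a ∈ s, a ∈ L) :
    PySem.Set.len (s.diff t) =
      ∑ a ∈ L.toFinset, (if a ∈ s ∧ a ∉ t then (1 : Int) else 0) := by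
  rw [Finset.sum_boole]
  unfold PySem.Set.len PySem.Set.diff
  have hnd : (List.filter (fun x => !t.contains x) s).Nodup := hs.filter _
  rw [← List.toFinset_card_of_nodup hnd]
  congr 2
  apply Finset.ext
  intro a
  simp only [List.mem_toFinset, List.mem_filter, Finset.mem_filter, Bool.not_eq_true',
    PySem.Set.contains, List.contains_eq_mem, decide_eq_false_iff_not]
  constructor
  · rintro ⟨h1, h2⟩; exact ⟨hsub a h1, h1, h2⟩
  · rintro ⟨_, h1, h2⟩; exact ⟨h1, h2⟩
theorem pv_triangle (N : ℕ) (D : ℕ → ℕ → Int) (hsymm : ∀ i j, D i j = D j i)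
    (hdiag : ∀ i, D i i = 0) :
    ∑ i ∈ Finset.range N, ∑ j ∈ Finset.Ico i N, D i j * 2 =
    ∑ i ∈ Finset.range N, ∑ j ∈ Finset.range N, D i j := by
  have hfil : ∀ i : ℕ, Finset.Ico i N = (Finset.range N).filter (fun j => i ≤ j) := by
    intro i; apply Finset.ext; intro j
    simp only [Finset.mem_Ico, Finset.mem_filter, Finset.mem_range]; omega
  have hIco : ∀ (f : ℕ → ℕ → ℤ) (i : ℕ), ∑ j ∈ Finset.Ico i N, f i j
      = ∑ j ∈ Finset.range N, if i ≤ j then f i j else 0 := by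
    intro f i; rw [hfil i, Finset.sum_filter]
  have hS : (∑ i ∈ Finset.range N, ∑ j ∈ Finset.range N, if i ≤ j then D i j else 0)
      = ∑ i ∈ Finset.range N, ∑ j ∈ Finset.range N, if j ≤ i then D i j else 0 := by
    rw [Finset.sum_comm]
    refine Finset.sum_congr rfl (fun x _ => Finset.sum_congr rfl (fun y _ => ?_))
    rw [hsymm]
  calc ∑ i ∈ Finset.range N, ∑ j ∈ Finset.Ico i N, D i j * 2
      = ∑ i ∈ Finset.range N, ∑ j ∈ Finset.range N, (if i ≤ j then D i j else 0) * 2 := by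
        refine Finset.sum_congr rfl (fun i _ => ?_)
        rw [hIco (fun i j => D i j * 2) i]
        refine Finset.sum_congr rfl (fun j _ => ?_)
        split_ifs <;> ring
    _ = (∑ i ∈ Finset.range N, ∑ j ∈ Finset.range N, if i ≤ j then D i j else 0)
        + ∑ i ∈ Finset.range N, ∑ j ∈ Finset.range N, if j ≤ i then D i j else 0 := by
        rw [← hS, ← Finset.sum_add_distrib]
        refine Finset.sum_congr rfl (fun i _ => ?_)
        rw [← Finset.sum_add_distrib]
        refine Finset.sum_congr rfl (fun j _ => ?_)
        split_ifs <;> ring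
    _ = ∑ i ∈ Finset.range N, ∑ j ∈ Finset.range N, D i j := by
        rw [← Finset.sum_add_distrib]
        refine Finset.sum_congr rfl (fun i _ => ?_)
        rw [← Finset.sum_add_distrib]
        refine Finset.sum_congr rfl (fun j _ => ?_)
        rcases lt_trichotomy i j with h | h | h
        · rw [if_pos (le_of_lt h), if_neg (by omega)]; ring
        · subst h; rw [if_pos le_rfl, hdiag]; ring
        · rw [if_neg (by omega), if_pos (le_of_lt h)]; ring
theorem pv_diff_inter (s t : PySem.Set Char) : s.diff (s.inter t) = s.diff t := by
  unfold PySem.Set.diff PySem.Set.inter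
  apply List.filter_congr
  intro x hx
  simp [PySem.Set.contains, hx]
theorem pv_diff_inter' (s t : PySem.Set Char) : t.diff (s.inter t) = t.diff s := by
  unfold PySem.Set.diff PySem.Set.inter
  apply List.filter_congr
  intro x hx
  simp [PySem.Set.contains, hx]
theorem pv_len_diff_self (s : PySem.Set Char) : PySem.Set.len (s.diff s) = 0 := by
  unfold PySem.Set.len PySem.Set.diff
  simp [List.filter_eq_nil_iff, PySem.Set.contains]
theorem pv_pyRange_cast (m n : ℕ) (h : m ≤ n) :
    PySem.List.pyRange (m : ℤ) (n : ℤ) = (List.range (n - m)).map (fun k => ((m + k : ℕ) : ℤ)) := by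
  unfold PySem.List.pyRange
  rw [if_neg (by norm_num)]
  rcases Nat.lt_or_ge m n with hlt | hge
  · rw [if_pos (by norm_num), if_pos (by exact_mod_cast hlt)]
    have : ((n : ℤ) - m + 1 - 1) / 1 = ((n - m : ℕ) : ℤ) := by omega
    rw [this, Int.toNat_natCast]
    apply List.map_congr_left
    intro k _; push_cast; ring
  · have : n = m := le_antisymm hge h
    subst this
    rw [if_pos (by norm_num), if_neg (by omega)]
    simp
theorem pv_foldl_inner_add {α : Type} (l : List α) (f : Int → α → Int) (g : α → Int)
    (hf : ∀ c x, f c x = c + g x) (a : Int) : l.foldl f a = a + (l.map g).sum := by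
  induction l generalizing a with
  | nil => simp
  | cons x l ih => rw [List.foldl_cons, hf, List.map_cons, List.sum_cons, ih, add_assoc]

theorem pv_sum_swap (R : Finset ℕ) (F : Finset Char) (u v : Char → Char → ℕ → ℤ) :
    ∑ i ∈ R, ∑ j ∈ R, ∑ a ∈ F, ∑ b ∈ F, u a b i * v a b j
      = ∑ a ∈ F, ∑ b ∈ F, (∑ i ∈ R, u a b i) * (∑ j ∈ R, v a b j) := by
  have step1 : ∀ i ∈ R, ∑ j ∈ R, ∑ a ∈ F, ∑ b ∈ F, u a b i * v a b j
      = ∑ a ∈ F, ∑ b ∈ F, ∑ j ∈ R, u a b i * v a b j := by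
    intro i _
    rw [Finset.sum_comm]
    exact Finset.sum_congr rfl (fun a _ => Finset.sum_comm)
  rw [Finset.sum_congr rfl step1, Finset.sum_comm]
  refine Finset.sum_congr rfl (fun a _ => ?_)
  rw [Finset.sum_comm]
  refine Finset.sum_congr rfl (fun b _ => ?_)
  rw [Finset.sum_mul]
  exact Finset.sum_congr rfl (fun i _ => (Finset.mul_sum _ _ _).symm)

theorem pv_core (V : List (PySem.Set Char)) (L : PySem.Set Char)
    (hV : ∀ s ∈ V, s.Nodup) (hL : L.Nodup)
    (hmem : ∀ a, a ∈ L ↔ ∃ s ∈ V, a ∈ s) :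
    (PySem.List.pyRange 0 (V.length : Int)).foldl (fun cnt i =>
      (PySem.List.pyRange i (V.length : Int)).foldl (fun cnt j =>
        let vi := PySem.List.pyGetD V i PySem.Set.empty
        let vj := PySem.List.pyGetD V j PySem.Set.empty
        let inter := vi.inter vj
        cnt + PySem.Set.len (vi.diff inter) * PySem.Set.len (vj.diff inter) * 2) cnt) 0 =
    L.foldl (fun tot a =>
      L.foldl (fun tot b =>
        tot + ((V.filter (fun s => s.contains a && !(s.contains b))).length : Int)
            * ((V.filter (fun s => s.contains b && !(s.contains a))).length : Int)) tot) 0 := by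
  set N := V.length with hN
  set W : ℕ → PySem.Set Char := fun i => V.getD i PySem.Set.empty with hW
  set F := L.toFinset with hF
  set c : Char → Char → ℤ := fun a b => ((V.countP (fun s => s.contains a && !(s.contains b)) : ℕ) : ℤ) with hc
  set D : ℕ → ℕ → ℤ := fun i j => PySem.Set.len ((W i).diff (W j)) * PySem.Set.len ((W j).diff (W i)) with hD
  have hA : (PySem.List.pyRange 0 (N : Int)).foldl (fun cnt i =>
      (PySem.List.pyRange i (N : Int)).foldl (fun cnt j =>
        let vi := PySem.List.pyGetD V i PySem.Set.empty
        let vj := PySem.List.pyGetD V j PySem.Set.empty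
        let inter := vi.inter vj
        cnt + PySem.Set.len (vi.diff inter) * PySem.Set.len (vj.diff inter) * 2) cnt) 0
      = ∑ i ∈ Finset.range N, ∑ j ∈ Finset.Ico i N, D i j * 2 := by
    have hinner : ∀ (a i : ℤ), (PySem.List.pyRange i (N : Int)).foldl (fun cnt j =>
        let vi := PySem.List.pyGetD V i PySem.Set.empty
        let vj := PySem.List.pyGetD V j PySem.Set.empty
        let inter := vi.inter vj
        cnt + PySem.Set.len (vi.diff inter) * PySem.Set.len (vj.diff inter) * 2) a
        = a + ((PySem.List.pyRange i (N : Int)).map (fun j =>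
            PySem.Set.len ((PySem.List.pyGetD V i PySem.Set.empty).diff
              ((PySem.List.pyGetD V i PySem.Set.empty).inter (PySem.List.pyGetD V j PySem.Set.empty)))
          * PySem.Set.len ((PySem.List.pyGetD V j PySem.Set.empty).diff
              ((PySem.List.pyGetD V i PySem.Set.empty).inter (PySem.List.pyGetD V j PySem.Set.empty)))
          * 2)).sum := by
      intro a i
      exact pv_foldl_inner_add _ _ _ (fun cn x => rfl) a
    rw [pv_foldl_inner_add _ _ _ (fun cn x => hinner cn x) 0, zero_add]
    have h0 : (0:ℤ) = ((0:ℕ):ℤ) := rfl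
    rw [h0, pv_pyRange_cast 0 N (Nat.zero_le N), List.map_map]
    have hsum0 : ∀ (g : ℤ → ℤ), ((List.range (N - 0)).map ((fun i : ℤ => g i) ∘ (fun k : ℕ => ((0 + k : ℕ) : ℤ)))).sum
        = ∑ i ∈ Finset.range N, g (i : ℤ) := by
      intro g
      simp only [Nat.sub_zero, Nat.zero_add]
      rfl
    rw [hsum0]
    refine Finset.sum_congr rfl (fun i hi => ?_)
    have hiN : i < N := Finset.mem_range.mp hi
    rw [pv_pyRange_cast i N (le_of_lt hiN), List.map_map]
    have hsum1 : ∀ (g : ℤ → ℤ), ((List.range (N - i)).map ((fun j : ℤ => g j) ∘ (fun k : ℕ => ((i + k : ℕ) : ℤ)))).sum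
        = ∑ k ∈ Finset.range (N - i), g ((i + k : ℕ) : ℤ) := by
      intro g; rfl
    rw [hsum1]
    conv_rhs => rw [Finset.sum_Ico_eq_sum_range]
    refine Finset.sum_congr rfl (fun k hk => ?_)
    rw [PySem.List.pyGetD_natCast, PySem.List.pyGetD_natCast, pv_diff_inter, pv_diff_inter']
  have hB : L.foldl (fun tot a =>
      L.foldl (fun tot b =>
        tot + ((V.filter (fun s => s.contains a && !(s.contains b))).length : Int)
            * ((V.filter (fun s => s.contains b && !(s.contains a))).length : Int)) tot) 0
      = ∑ a ∈ F, ∑ b ∈ F, c a b * c b a := by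
    have hinner : ∀ (t : ℤ) (a : Char), L.foldl (fun tot b =>
        tot + ((V.filter (fun s => s.contains a && !(s.contains b))).length : Int)
            * ((V.filter (fun s => s.contains b && !(s.contains a))).length : Int)) t
        = t + (L.map (fun b => c a b * c b a)).sum := by
      intro t a
      apply pv_foldl_inner_add
      intro cn b
      simp only [hc, List.countP_eq_length_filter]
    rw [pv_foldl_inner_add _ _ _ (fun t a => hinner t a) 0, zero_add,
      ← List.sum_toFinset _ hL, ← hF]
    refine Finset.sum_congr rfl (fun a _ => ?_)
    rw [← List.sum_toFinset _ hL, ← hF]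
  have hmid : ∑ i ∈ Finset.range N, ∑ j ∈ Finset.range N, D i j = ∑ a ∈ F, ∑ b ∈ F, c a b * c b a := by
    have hWV : ∀ i, i ∈ Finset.range N → W i ∈ V := by
      intro i hi
      have hlt : i < V.length := Finset.mem_range.mp hi
      rw [hW]
      simp only [List.getD_eq_getElem?_getD, List.getElem?_eq_getElem hlt, Option.getD_some]
      exact List.getElem_mem hlt
    have hWnd : ∀ i, i ∈ Finset.range N → (W i).Nodup := fun i hi => hV _ (hWV i hi)
    have hWsub : ∀ i, i ∈ Finset.range N → ∀ a ∈ W i, a ∈ L := by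
      intro i hi a ha
      exact (hmem a).mpr ⟨W i, hWV i hi, ha⟩
    have hcs : ∀ a b, c a b = ∑ i ∈ Finset.range N, (if a ∈ W i ∧ b ∉ W i then (1:ℤ) else 0) := by
      intro a b
      simp only [hc]
      rw [pv_countP_eq_sum]
      refine Finset.sum_congr rfl (fun i _ => ?_)
      congr 1
      simp [PySem.Set.contains, hW]
    have hregroup : ∀ (p q r t : Prop) [Decidable p] [Decidable q] [Decidable r] [Decidable t],
        (if p ∧ q then (1:ℤ) else 0) * (if r ∧ t then (1:ℤ) else 0)
          = (if p ∧ t then (1:ℤ) else 0) * (if r ∧ q then (1:ℤ) else 0) := by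
      intro p q r t _ _ _ _
      split_ifs <;> simp_all
    calc ∑ i ∈ Finset.range N, ∑ j ∈ Finset.range N, D i j
        = ∑ i ∈ Finset.range N, ∑ j ∈ Finset.range N, ∑ a ∈ F, ∑ b ∈ F,
            (if a ∈ W i ∧ b ∉ W i then (1:ℤ) else 0) * (if b ∈ W j ∧ a ∉ W j then (1:ℤ) else 0) := by
          refine Finset.sum_congr rfl (fun i hi => Finset.sum_congr rfl (fun j hj => ?_))
          rw [hD]
          simp only
          rw [pv_len_diff_eq_sum L (W i) (W j) (hWnd i hi) (hWsub i hi),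
            pv_len_diff_eq_sum L (W j) (W i) (hWnd j hj) (hWsub j hj), ← hF,
            Finset.sum_mul_sum]
          exact Finset.sum_congr rfl (fun a _ => Finset.sum_congr rfl (fun b _ => hregroup _ _ _ _))
      _ = ∑ a ∈ F, ∑ b ∈ F, c a b * c b a := by
          rw [pv_sum_swap]
          refine Finset.sum_congr rfl (fun a _ => Finset.sum_congr rfl (fun b _ => ?_))
          rw [hcs a b, hcs b a]
  rw [hA, hB, ← hmid]
  apply pv_triangle
  · intro i j; rw [hD]; ring
  · intro i; rw [hD]; simp only [pv_len_diff_self]; ring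

-- ===== VERDICT (by name: the statement is the Claim_ definition above) =====
theorem distinctNames_spec : Claim_equal_distinctNames := by
  intro ideas _hdom _hpre
  unfold Spec_distinctNames distinctNames distinctNames_alt
  rw [pvStepA_eq_stepB]
  apply pv_core
  · exact pv_build_values_nodup ideas PySem.Dict.empty (by simp [PySem.Dict.values, PySem.Dict.empty])
  · exact pv_nodup_foldl_union _ _ (by simp [PySem.Set.empty])
  · intro a
    rw [pv_mem_foldl_union]
    simp [PySem.Set.empty]
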